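-- pv_equiv track=rewrite | github.com/CustomAI-priv/Jarvis | backend/analytical_model.py | _parse_code_execution_response
-- ===== SOURCE A (Python) =====
-- def _parse_code_execution_response(response: str):
--     """parse the code execution response and remove warnings from output"""
--
--     # Parse the response
--     content = response
--     lines = content.split('\n')
--
--     execution_status = ''
--     code_output = ''
--     error_message = ''
--
--     # Process lines for code output, removing warnings
--     output_lines = []
--     warning_line = False
--
--     for line in lines:
--         if line.startswith('exitcode:'):
--             execution_status = 'success' if 'execution succeeded' in line else 'failed'
--         elif line.startswith('Code output:'):
--             # Get all lines after 'Code output:'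
--             output_section = lines[lines.index(line)+1:]
--
--             # Filter out warning lines
--             for out_line in output_section:
--                 # Skip lines containing warnings
--                 if any(warn in out_line for warn in ['Warning:', 'FutureWarning:', 'UserWarning:', 'DeprecationWarning:']):
--                     continue
--                 # Skip lines that are continuations of warnings (usually indented)
--                 if out_line.startswith('  ') and warning_line:
--                     continue
--                 # Reset warning line flag and keep the line
--                 warning_line = False
--                 output_lines.append(out_line)
--
--             code_output = '\n'.join(line for line in output_lines if line.strip())
--             break
--
--     if execution_status == 'failed':
--         error_message = code_output
--         code_output = ''
--
--     return {
--         'execution_status': execution_status,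
--         'console_output': code_output,
--         'error': error_message
--     }
-- ===== SOURCE B (Python) =====
-- _WARNINGS = ('Warning:', 'FutureWarning:', 'UserWarning:', 'DeprecationWarning:')
--
--
-- def _parse_code_execution_response(response: str):
--     """One linear pass with a mode flag: before the 'Code output:' marker track
--     the exitcode verdict; after it, accumulate non-warning, non-blank lines."""
--     in_output = False
--     execution_status = ''
--     kept = []
--     for line in response.split('\n'):
--         if in_output:
--             if line.strip() and not any(w in line for w in _WARNINGS):
--                 kept.append(line)
--         elif line.startswith('Code output:'):
--             in_output = True
--         elif line.startswith('exitcode:'):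
--             execution_status = 'success' if 'execution succeeded' in line else 'failed'
--     code_output = '\n'.join(kept)
--     if execution_status == 'failed':
--         return {'execution_status': 'failed', 'console_output': '', 'error': code_output}
--     return {'execution_status': execution_status, 'console_output': code_output, 'error': ''}
-- ===== Notes on version B (the rewrite author's own statement) =====
-- stated objective: simpler
-- what changed: Replaces A's staged parse (break at the marker, list.index to re-find it, slice, separate inner filtering loop with a dead flag, second blank-line filter at join time) by one linear state-machine pass with a mode flag and accumulator that never re-indexes or slices the list.
import Mathlib
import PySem

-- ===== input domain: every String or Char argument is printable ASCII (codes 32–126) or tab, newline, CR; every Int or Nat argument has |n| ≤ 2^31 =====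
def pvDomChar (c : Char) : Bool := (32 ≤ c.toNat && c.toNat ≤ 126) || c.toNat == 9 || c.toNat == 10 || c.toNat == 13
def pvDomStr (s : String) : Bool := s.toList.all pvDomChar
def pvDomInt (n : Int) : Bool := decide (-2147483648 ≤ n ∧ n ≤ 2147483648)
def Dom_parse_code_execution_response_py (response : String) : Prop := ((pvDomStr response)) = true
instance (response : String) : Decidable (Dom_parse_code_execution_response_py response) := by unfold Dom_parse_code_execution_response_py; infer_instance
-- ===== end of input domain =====

-- B replaces A's staged parse (break at the marker, list.index, slice, inner filter loop with a
-- dead flag) by one linear state-machine pass with a mode flag and an accumulator; same result.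

-- ===== PORT A =====
def pvA_warns : List String := ["Warning:", "FutureWarning:", "UserWarning:", "DeprecationWarning:"]

-- inner 'for out_line in output_section' loop, with A's warning_line flag kept as-is
def pvA_filter (sec : List String) (warning_line : Bool) (acc : List String) : List String :=
  match sec with
  | [] => acc
  | l :: rs =>
    if pvA_warns.any (fun w => PySem.Str.isIn w l) then pvA_filter rs warning_line acc
    else if PySem.Str.startswith l "  " && warning_line then pvA_filter rs warning_line acc
    else pvA_filter rs false (acc ++ [l])

-- the 'for line in lines' loop; breaks (returns) at the 'Code output:' branch
def pvA_loop (all : List String) (rem : List String) (status : String) : String × String :=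
  match rem with
  | [] => (status, "")
  | l :: rs =>
    if PySem.Str.startswith l "exitcode:" then
      pvA_loop all rs (if PySem.Str.isIn "execution succeeded" l then "success" else "failed")
    else if PySem.Str.startswith l "Code output:" then
      let idx := (PySem.List.index? all l).getD 0
      let sec := PySem.List.slice all (some ((idx : Int) + 1)) none
      let output_lines := pvA_filter sec false []
      (status, PySem.Str.join "\n" (output_lines.filter (fun t => !(PySem.Str.strip t == ""))))
    else pvA_loop all rs status

def parse_code_execution_response_py (response : String) : List (String × String) :=
  let lines := (PySem.Str.split? response "\n").getD []
  let res := pvA_loop lines lines ""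
  let status := res.1
  let code_output := res.2
  if status == "failed" then
    [("execution_status", status), ("console_output", ""), ("error", code_output)]
  else
    [("execution_status", status), ("console_output", code_output), ("error", "")]

-- ===== PORT B =====
def pvB_warns : List String := ["Warning:", "FutureWarning:", "UserWarning:", "DeprecationWarning:"]

-- 'line.strip() and not any(w in line …)'
def pvB_keep (l : String) : Bool :=
  !(PySem.Str.strip l == "") && !(pvB_warns.any (fun w => PySem.Str.isIn w l))

-- one iteration of B's single loop; state = (in_output, execution_status, kept)
def pvB_step (st : Bool × String × List String) (l : String) : Bool × String × List String :=
  if st.1 then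
    (if pvB_keep l then (true, st.2.1, st.2.2 ++ [l]) else st)
  else if PySem.Str.startswith l "Code output:" then (true, st.2.1, st.2.2)
  else if PySem.Str.startswith l "exitcode:" then
    (false, (if PySem.Str.isIn "execution succeeded" l then "success" else "failed"), st.2.2)
  else st

def parse_code_execution_response_py_alt (response : String) : List (String × String) :=
  let lines := (PySem.Str.split? response "\n").getD []
  let st := lines.foldl pvB_step (false, "", [])
  let code_output := PySem.Str.join "\n" st.2.2
  if st.2.1 == "failed" then
    [("execution_status", "failed"), ("console_output", ""), ("error", code_output)]
  else
    [("execution_status", st.2.1), ("console_output", code_output), ("error", "")]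

-- ===== PRECONDITION & SPEC =====
def Spec_parse_code_execution_response_py (response : String) (out : List (String × String)) : Prop := out = parse_code_execution_response_py_alt response
instance (response : String) (out : List (String × String)) : Decidable (Spec_parse_code_execution_response_py response out) := by unfold Spec_parse_code_execution_response_py; infer_instance

-- ===== CLAIM (what is proved, stated in full; the proofs are below) =====
def Claim_equal_parse_code_execution_response_py : Prop := ∀ (response : String), Dom_parse_code_execution_response_py response → Spec_parse_code_execution_response_py response (parse_code_execution_response_py response)

-- ===== LEMMAS AND PROOFS =====

-- a line cannot start with both "exitcode:" and "Code output:"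
theorem pv_not_both (l : String) (h1 : PySem.Str.startswith l "exitcode:" = true)
    (h2 : PySem.Str.startswith l "Code output:" = true) : False := by
  simp only [PySem.Str.startswith_eq, PySem.Chars.startswith_iff] at h1 h2
  have := List.prefix_of_prefix_length_le h1 h2 (by decide)
  revert this; decide

-- A's inner filter loop with the (never-true) flag down is a plain filter
theorem pvA_filter_false (sec acc : List String) :
    pvA_filter sec false acc = acc ++ sec.filter (fun l => !(pvA_warns.any (fun w => PySem.Str.isIn w l))) := by
  induction sec generalizing acc with
  | nil => simp [pvA_filter]
  | cons l rs ih =>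
    by_cases h : (pvA_warns.any fun w => PySem.Str.isIn w l) = true
    · simp only [pvA_filter, h, if_true]
      rw [ih, List.filter_cons_of_neg (by simp only [h, Bool.not_true]; decide)]
    · have h' : (pvA_warns.any fun w => PySem.Str.isIn w l) = false := Bool.eq_false_iff.mpr h
      simp only [pvA_filter, h', Bool.false_eq_true, if_false, Bool.and_false]
      rw [ih, List.filter_cons_of_pos (by simp only [h', Bool.not_false]), List.append_assoc,
        List.singleton_append]

-- the main invariant: A's loop over the suffix rem of all = pre ++ rem, pre free of marker lines
set_option maxHeartbeats 1000000 in
theorem pvA_loop_eq (rem pre : List String) (status : String)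
    (hpre : ∀ l ∈ pre, PySem.Str.startswith l "Code output:" = false) :
    pvA_loop (pre ++ rem) rem status =
      (match rem.findIdx? (fun l => PySem.Str.startswith l "Code output:") with
       | none => (rem.foldl (fun s l =>
            if PySem.Str.startswith l "exitcode:" then
              (if PySem.Str.isIn "execution succeeded" l then "success" else "failed")
            else s) status, "")
       | some k => ((rem.take k).foldl (fun s l =>
            if PySem.Str.startswith l "exitcode:" then
              (if PySem.Str.isIn "execution succeeded" l then "success" else "failed")
            else s) status,
          PySem.Str.join "\n" ((rem.drop (k + 1)).filter pvB_keep))) := by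
  induction rem generalizing pre status with
  | nil =>
    simp only [List.findIdx?_nil, List.foldl_nil]
    rfl
  | cons l rs ih =>
    by_cases hco : PySem.Str.startswith l "Code output:" = true
    · -- marker line: A breaks here, findIdx? = some 0
      have hex : PySem.Str.startswith l "exitcode:" = false := by
        by_contra h
        simp only [Bool.not_eq_false] at h
        exact pv_not_both l h hco
      have hidx : PySem.List.index? (pre ++ l :: rs) l = some pre.length := by
        rw [PySem.List.index?_eq_some_iff]
        refine ⟨pre, rs, rfl, rfl, fun hmem => ?_⟩
        have := hpre l hmem
        rw [this] at hco; exact Bool.false_ne_true hco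
      have hslice : PySem.List.slice (pre ++ l :: rs) (some ((pre.length : Int) + 1)) none
          = rs := by
        have : ((pre.length : Int) + 1) = ((pre.length + 1 : Nat) : Int) := by push_cast; ring
        rw [this, PySem.List.slice_from_natCast]
        simp
      simp only [pvA_loop, hex, hco, if_true, if_false, Bool.false_eq_true, hidx,
        Option.getD_some, hslice, List.findIdx?_cons, List.take_zero, List.foldl_nil,
        List.drop_succ_cons, List.drop_zero]
      rw [pvA_filter_false, List.nil_append, List.filter_filter]
      have hpred : (fun a => !(PySem.Str.strip a == "") && !(pvA_warns.any fun w => PySem.Str.isIn w a))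
          = pvB_keep := by
        funext a
        simp only [pvB_keep, pvB_warns, pvA_warns]
      rw [hpred]
    · -- not the marker: step and use the IH with pre ++ [l]
      simp only [Bool.not_eq_true] at hco
      have hpre' : ∀ x ∈ pre ++ [l], PySem.Str.startswith x "Code output:" = false := by
        intro x hx
        rcases List.mem_append.mp hx with h | h
        · exact hpre x h
        · simp only [List.mem_singleton] at h; subst h; exact hco
      have hassoc : pre ++ l :: rs = (pre ++ [l]) ++ rs := by simp
      by_cases hex : PySem.Str.startswith l "exitcode:" = true
      · simp only [pvA_loop, hex, if_true]
        rw [hassoc, ih (pre ++ [l]) _ hpre']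
        simp only [List.findIdx?_cons, hco, Bool.false_eq_true, if_false]
        simp at hex
        cases hfi : rs.findIdx? (fun l => PySem.Str.startswith l "Code output:") with
        | none => simp [List.foldl_cons, hex]
        | some k => simp [List.foldl_cons, hex]
      · simp only [Bool.not_eq_true] at hex
        simp only [pvA_loop, hex, hco, Bool.false_eq_true, if_false]
        rw [hassoc, ih (pre ++ [l]) _ hpre']
        simp only [List.findIdx?_cons, hco, Bool.false_eq_true, if_false]
        simp at hex
        cases hfi : rs.findIdx? (fun l => PySem.Str.startswith l "Code output:") with
        | none => simp [List.foldl_cons, hex]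
        | some k => simp [List.foldl_cons, hex]

-- B's fold once the mode flag is up is a plain filter-append
theorem pvB_fold_seen (rem : List String) (s : String) (acc : List String) :
    rem.foldl pvB_step (true, s, acc) = (true, s, acc ++ rem.filter pvB_keep) := by
  induction rem generalizing acc with
  | nil => simp
  | cons l rs ih =>
    by_cases h : pvB_keep l = true
    · simp only [List.foldl_cons, pvB_step, if_true, h, ih, List.filter_cons_of_pos h,
        List.append_assoc, List.singleton_append]
    · have h' : pvB_keep l = false := Bool.eq_false_iff.mpr h
      rw [List.foldl_cons, show pvB_step (true, s, acc) l = (true, s, acc) from by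
        simp [pvB_step, h'], ih, List.filter_cons_of_neg (by simp [h'])]

-- B's fold from the unseen state has the same boundary characterisation as A's loop
theorem pvB_fold_unseen (rem : List String) (s : String) :
    rem.foldl pvB_step (false, s, []) =
      (match rem.findIdx? (fun l => PySem.Str.startswith l "Code output:") with
       | none => (false, rem.foldl (fun s l =>
            if PySem.Str.startswith l "exitcode:" then
              (if PySem.Str.isIn "execution succeeded" l then "success" else "failed")
            else s) s, [])
       | some k => (true, (rem.take k).foldl (fun s l =>
            if PySem.Str.startswith l "exitcode:" then
              (if PySem.Str.isIn "execution succeeded" l then "success" else "failed")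
            else s) s,
          (rem.drop (k + 1)).filter pvB_keep)) := by
  induction rem generalizing s with
  | nil => simp
  | cons l rs ih =>
    by_cases hco : PySem.Str.startswith l "Code output:" = true
    · simp only [List.foldl_cons, pvB_step, hco, if_true, Bool.false_eq_true, if_false,
        pvB_fold_seen, List.nil_append, List.findIdx?_cons, List.take_zero, List.foldl_nil,
        List.drop_succ_cons, List.drop_zero]
    · have hco' : PySem.Str.startswith l "Code output:" = false := Bool.eq_false_iff.mpr hco
      by_cases hex : PySem.Str.startswith l "exitcode:" = true
      · simp only [List.foldl_cons, pvB_step, hco', hex, Bool.false_eq_true, if_false, if_true]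
        rw [ih]
        simp only [List.findIdx?_cons, hco', Bool.false_eq_true, if_false]
        simp at hex
        cases hfi : rs.findIdx? (fun l => PySem.Str.startswith l "Code output:") with
        | none => simp [List.foldl_cons, hex]
        | some k => simp [List.foldl_cons, hex]
      · have hex' : PySem.Str.startswith l "exitcode:" = false := Bool.eq_false_iff.mpr hex
        simp only [List.foldl_cons, pvB_step, hco', hex', Bool.false_eq_true, if_false]
        rw [ih]
        simp only [List.findIdx?_cons, hco', Bool.false_eq_true, if_false]
        simp at hex'
        cases hfi : rs.findIdx? (fun l => PySem.Str.startswith l "Code output:") with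
        | none => simp [List.foldl_cons, hex']
        | some k => simp [List.foldl_cons, hex']

-- ===== VERDICT (by name: the statement is the Claim_ definition above) =====
theorem parse_code_execution_response_py_spec : Claim_equal_parse_code_execution_response_py := by
  intro response _
  unfold Spec_parse_code_execution_response_py
  simp only [parse_code_execution_response_py, parse_code_execution_response_py_alt]
  have hA := pvA_loop_eq ((PySem.Str.split? response "\n").getD []) [] ""
    (by intro l hl; exact absurd hl (List.not_mem_nil))
  rw [List.nil_append] at hA
  rw [hA, pvB_fold_unseen]
  cases hfi : ((PySem.Str.split? response "\n").getD []).findIdx?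
      (fun l => PySem.Str.startswith l "Code output:") with
  | none =>
    simp only
    split_ifs with hf
    · simp at hf
      simp [hf, PySem.Str.join]
    · simp [PySem.Str.join]
  | some k =>
    simp only
    split_ifs with hf
    · simp at hf
      simp [hf]
    · simp
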